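-- pv_equiv track=rewrite | github.com/KoStard/HermesCLI | src/hermes/utils/markdown_highlighter.py | line_aggregator
-- ===== SOURCE A (Python) =====
-- from typing import Generator
--
-- def line_aggregator(generator: Generator[str, None, None]) -> Generator[str, None, None]:
--     buffer = ""
--     for chunk in generator:
--         buffer += chunk
--         while "\n" in buffer:
--             line, buffer = buffer.split("\n", 1)
--             yield line + "\n"
--     if buffer:
--         yield buffer
-- ===== SOURCE B (Python) =====
-- def line_aggregator(generator):
--     # Single pass over the characters: emit a line whenever a newline is seen.
--     text = "".join(generator)
--     line = []
--     for ch in text: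
--         line.append(ch)
--         if ch == "\n":
--             yield "".join(line)
--             line = []
--     if line:
--         yield "".join(line)
-- ===== Notes on version B (the rewrite author's own statement) =====
-- stated objective: faster
-- what changed: B replaces A's repeated buffer concatenation and split('\n',1) re-scanning with one join of all chunks followed by a single character-at-a-time pass that emits a line at each newline.
import Mathlib
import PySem

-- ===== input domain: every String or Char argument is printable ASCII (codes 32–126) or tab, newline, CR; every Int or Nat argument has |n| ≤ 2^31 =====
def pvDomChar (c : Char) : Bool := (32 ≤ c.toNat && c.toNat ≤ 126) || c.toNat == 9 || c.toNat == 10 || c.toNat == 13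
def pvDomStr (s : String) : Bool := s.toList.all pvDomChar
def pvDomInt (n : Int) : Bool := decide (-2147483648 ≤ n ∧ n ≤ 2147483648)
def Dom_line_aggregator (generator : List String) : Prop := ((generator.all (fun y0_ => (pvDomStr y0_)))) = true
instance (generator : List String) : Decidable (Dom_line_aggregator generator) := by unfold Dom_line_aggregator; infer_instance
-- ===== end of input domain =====

-- B replaces A's repeated buffer-concat-and-split with a single character pass; objective: faster (single O(n) scan).

-- ===== PORT A =====
-- `while "\n" in buffer: line, buffer = buffer.split("\n", 1)` : hand-ported, exact — the
-- first piece of split("\n",1) is everything before the first '\n', the second everything after.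
theorem lineAggWhile_dec {buf : List Char} (h : '\n' ∈ buf) :
    ((buf.dropWhile (· ≠ '\n')).tail).length < buf.length := by
  have hne : buf.dropWhile (· ≠ '\n') ≠ [] := by
    intro hnil
    have := (List.dropWhile_eq_nil_iff (l := buf) (p := (· ≠ '\n'))).mp hnil '\n' h
    simp at this
  have h1 : (buf.dropWhile (· ≠ '\n')).length ≤ buf.length := List.length_dropWhile_le _ _
  have h2 : ((buf.dropWhile (· ≠ '\n')).tail).length < (buf.dropWhile (· ≠ '\n')).length := by
    cases hd : buf.dropWhile (· ≠ '\n') with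
    | nil => exact absurd hd hne
    | cons a t => simp
  omega

def lineAggWhile (buf : List Char) : List String × List Char :=
  if h : '\n' ∈ buf then
    let line := buf.takeWhile (· ≠ '\n')
    let rest := (buf.dropWhile (· ≠ '\n')).tail
    let r := lineAggWhile rest
    (String.ofList (line ++ ['\n']) :: r.1, r.2)
  else ([], buf)
termination_by buf.length
decreasing_by exact lineAggWhile_dec h

def line_aggregator (generator : List String) : List String :=
  let st := generator.foldl
    (fun (st : List String × List Char) chunk =>
      let buf := st.2 ++ chunk.toList
      let r := lineAggWhile buf
      (st.1 ++ r.1, r.2)) ([], [])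
  if st.2 = [] then st.1 else st.1 ++ [String.ofList st.2]

-- ===== PORT B =====
def lineAggStep (st : List String × List Char) (ch : Char) : List String × List Char :=
  let line := st.2 ++ [ch]
  if ch = '\n' then (st.1 ++ [String.ofList line], []) else (st.1, line)

def line_aggregator_alt (generator : List String) : List String :=
  let text := PySem.Str.join "" generator
  let st := text.toList.foldl lineAggStep ([], [])
  if st.2 = [] then st.1 else st.1 ++ [String.ofList st.2]

-- ===== PRECONDITION & SPEC =====
def Spec_line_aggregator (generator : List String) (out : List String) : Prop := out = line_aggregator_alt generator
instance (generator : List String) (out : List String) : Decidable (Spec_line_aggregator generator out) := by unfold Spec_line_aggregator; infer_instance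

-- ===== CLAIM (what is proved, stated in full; the proofs are below) =====
def Claim_equal_line_aggregator : Prop := ∀ (generator : List String), Dom_line_aggregator generator → Spec_line_aggregator generator (line_aggregator generator)

-- ===== LEMMAS AND PROOFS =====

-- If the buffer has no newline, A's while loop does nothing.
theorem lineAggWhile_no_nl {buf : List Char} (h : '\n' ∉ buf) : lineAggWhile buf = ([], buf) := by
  rw [lineAggWhile]
  simp [h]

theorem takeWhile_nl {buf : List Char} (cs : List Char) (h : '\n' ∉ buf) :
    (buf ++ '\n' :: cs).takeWhile (· ≠ '\n') = buf := by
  induction buf with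
  | nil => simp
  | cons a t ih =>
    have ha : ¬ a = '\n' := fun e => h (by simp [e])
    simp only [List.cons_append, List.takeWhile_cons]
    rw [if_pos (by simp [ha]), ih (fun hm => h (List.mem_cons_of_mem _ hm))]

theorem dropWhile_nl {buf : List Char} (cs : List Char) (h : '\n' ∉ buf) :
    (buf ++ '\n' :: cs).dropWhile (· ≠ '\n') = '\n' :: cs := by
  induction buf with
  | nil => simp
  | cons a t ih =>
    have ha : ¬ a = '\n' := fun e => h (by simp [e])
    simp only [List.cons_append, List.dropWhile_cons]
    rw [if_pos (by simp [ha]), ih (fun hm => h (List.mem_cons_of_mem _ hm))]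

-- Per-chunk correspondence: A's while loop on (buf ++ cs) matches B's char fold over cs
-- starting from leftover buf, provided buf holds no newline.
theorem chunk_corr (cs : List Char) :
    ∀ (out : List String) (buf : List Char), '\n' ∉ buf →
      (out ++ (lineAggWhile (buf ++ cs)).1, (lineAggWhile (buf ++ cs)).2)
        = cs.foldl lineAggStep (out, buf) := by
  induction cs with
  | nil =>
    intro out buf h
    simp [lineAggWhile_no_nl h]
  | cons c cs ih =>
    intro out buf h
    by_cases hc : c = '\n'
    · subst hc
      have hmem : '\n' ∈ buf ++ '\n' :: cs := by simp
      rw [lineAggWhile]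
      simp only [hmem, dif_pos, takeWhile_nl cs h, dropWhile_nl cs h, List.tail_cons]
      have hstep := ih (out ++ [String.ofList (buf ++ ['\n'])]) [] (by simp)
      simp only [List.nil_append] at hstep
      simp only [List.foldl_cons, lineAggStep, if_true]
      rw [← hstep]
      simp
    · have hne : ('\n' : Char) ≠ c := fun e => hc (Eq.symm e)
      have h' : '\n' ∉ buf ++ [c] := by simp [h, hne]
      have hstep := ih out (buf ++ [c]) h'
      simp only [List.append_assoc, List.singleton_append] at hstep
      rw [hstep]
      simp [lineAggStep, hc]

-- The leftover buffer of A's while loop never contains a newline.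
theorem lineAggWhile_snd_no_nl_aux (n : Nat) :
    ∀ buf : List Char, buf.length ≤ n → '\n' ∉ (lineAggWhile buf).2 := by
  induction n with
  | zero =>
    intro buf hlen
    have : buf = [] := List.length_eq_zero_iff.mp (Nat.le_zero.mp hlen)
    subst this
    rw [lineAggWhile]
    simp
  | succ n ih =>
    intro buf hlen
    rw [lineAggWhile]
    by_cases h : '\n' ∈ buf
    · simp only [h, dif_pos]
      exact ih _ (by have := lineAggWhile_dec h; omega)
    · rw [dif_neg h]
      exact h

theorem lineAggWhile_snd_no_nl (buf : List Char) : '\n' ∉ (lineAggWhile buf).2 :=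
  lineAggWhile_snd_no_nl_aux buf.length buf le_rfl

-- The two folds agree.
theorem fold_corr (gen : List String) :
    ∀ (out : List String) (buf : List Char), '\n' ∉ buf →
      gen.foldl
        (fun (st : List String × List Char) chunk =>
          let b := st.2 ++ chunk.toList
          let r := lineAggWhile b
          (st.1 ++ r.1, r.2)) (out, buf)
        = (gen.map String.toList).flatten.foldl lineAggStep (out, buf) := by
  induction gen with
  | nil => intro out buf h; simp
  | cons s gen ih =>
    intro out buf h
    simp only [List.foldl_cons, List.map_cons, List.flatten_cons, List.foldl_append]
    rw [← chunk_corr s.toList out buf h]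
    exact ih _ _ (lineAggWhile_snd_no_nl _)

-- "".join(parts) is plain concatenation.
theorem intersperse_nil_flatten : ∀ ps : List (List Char),
    (List.intersperse ([] : List Char) ps).flatten = ps.flatten
  | [] => rfl
  | [_] => by simp
  | a :: b :: t => by
    rw [List.intersperse_cons₂]
    simp [intersperse_nil_flatten (b :: t)]

theorem join_nil_flatten (ps : List (List Char)) : PySem.Chars.join [] ps = ps.flatten := by
  simp [PySem.Chars.join, List.intercalate, intersperse_nil_flatten]

-- ===== VERDICT (by name: the statement is the Claim_ definition above) =====
theorem line_aggregator_spec : Claim_equal_line_aggregator := by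
  intro generator _
  unfold Spec_line_aggregator line_aggregator line_aggregator_alt
  have h := fold_corr generator [] [] (by simp)
  simp only [h, PySem.Str.toList_join, String.toList_empty, join_nil_flatten]
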